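-- pv_equiv track=rewrite | github.com/AmaanBilwar/better-vscode | utils/patches.py | _split_section_hunks
-- ===== SOURCE A (Python) =====
-- def _split_section_hunks(section_lines):
--     hunk_starts = [
--         i
--         for i, line in enumerate(section_lines)
--         if line.startswith("@@ ") or line.startswith("@@@ ")
--     ]
--     if not hunk_starts:
--         return [section_lines]
--
--     prefix = section_lines[: hunk_starts[0]]
--     hunks = []
--     for i, start in enumerate(hunk_starts):
--         end = hunk_starts[i + 1] if i + 1 < len(hunk_starts) else len(section_lines)
--         hunks.append(prefix + section_lines[start:end])
--     return hunks
-- ===== SOURCE B (Python) =====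
-- def _split_section_hunks(section_lines):
--     prefix = []
--     hunks = []
--     current = None
--     for line in section_lines:
--         if line.startswith("@@ ") or line.startswith("@@@ "):
--             current = prefix + [line]
--             hunks.append(current)
--         elif current is None:
--             prefix.append(line)
--         else:
--             current.append(line)
--     if not hunks:
--         return [section_lines]
--     return hunks
-- ===== Notes on version B (the rewrite author's own statement) =====
-- stated objective: alternative
-- what changed: Replaces the two-phase approach (collect all header indices with enumerate, then slice the list once per hunk and prepend the prefix) with a single streaming pass that maintains the prefix and the current hunk and emits each hunk as it is seen.
import Mathlib
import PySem

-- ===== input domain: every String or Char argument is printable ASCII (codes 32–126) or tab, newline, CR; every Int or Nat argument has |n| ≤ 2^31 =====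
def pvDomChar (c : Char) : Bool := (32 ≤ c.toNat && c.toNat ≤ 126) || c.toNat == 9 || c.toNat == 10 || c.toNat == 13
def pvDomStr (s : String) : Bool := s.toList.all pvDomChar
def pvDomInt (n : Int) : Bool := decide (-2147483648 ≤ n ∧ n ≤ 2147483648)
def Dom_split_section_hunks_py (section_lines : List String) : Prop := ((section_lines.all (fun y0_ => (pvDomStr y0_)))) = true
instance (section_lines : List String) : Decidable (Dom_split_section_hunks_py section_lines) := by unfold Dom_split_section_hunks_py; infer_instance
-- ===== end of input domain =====

-- B replaces A's two-phase scheme (collect header indices, then slice per hunk) with one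
-- streaming pass maintaining the prefix and the current hunk (objective: alternative
-- decomposition of the same work).

-- ===== PORT A =====
-- `line.startswith("@@ ") or line.startswith("@@@ ")` (used verbatim by both Pythons)
def pvHdr (line : String) : Bool :=
  PySem.Str.startswith line "@@ " || PySem.Str.startswith line "@@@ "

-- the comprehension `[i for i, line in enumerate(section_lines) if …]`
def pvHdrStarts (s : Int) (ls : List String) : List Int :=
  ((PySem.List.enumerate ls s).filter (fun p => pvHdr p.2)).map (fun p => p.1)

def split_section_hunks_py (section_lines : List String) : List (List String) :=
  let hunk_starts : List Int := pvHdrStarts 0 section_lines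
  if hunk_starts.isEmpty then [section_lines]
  else
    let prefix_ := PySem.List.slice section_lines none (some (PySem.List.pyGetD hunk_starts 0 0))
    let hunks := (PySem.List.enumerate hunk_starts 0).foldl (fun acc p =>
      let ed : Int := if p.1 + 1 < (hunk_starts.length : Int)
                      then PySem.List.pyGetD hunk_starts (p.1 + 1) 0
                      else (section_lines.length : Int)
      acc ++ [prefix_ ++ PySem.List.slice section_lines (some p.2) (some ed)]) []
    hunks

-- ===== PORT B =====
-- the streaming loop: state = (remaining lines, prefix, finished hunks, current hunk or none)
def pvAltGo : List String → List String → List (List String) → Option (List String) → List (List String)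
  | [], _, hunks, none => hunks
  | [], _, hunks, some c => hunks ++ [c]
  | line :: rest, prefix_, hunks, cur =>
    if pvHdr line then
      match cur with
      | none => pvAltGo rest prefix_ hunks (some (prefix_ ++ [line]))
      | some c => pvAltGo rest prefix_ (hunks ++ [c]) (some (prefix_ ++ [line]))
    else
      match cur with
      | none => pvAltGo rest (prefix_ ++ [line]) hunks none
      | some c => pvAltGo rest prefix_ hunks (some (c ++ [line]))

def split_section_hunks_py_alt (section_lines : List String) : List (List String) :=
  let hunks := pvAltGo section_lines [] [] none
  if hunks.isEmpty then [section_lines] else hunks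

-- ===== PRECONDITION & SPEC =====
def Spec_split_section_hunks_py (section_lines : List String) (out : List (List String)) : Prop := out = split_section_hunks_py_alt section_lines
instance (section_lines : List String) (out : List (List String)) : Decidable (Spec_split_section_hunks_py section_lines out) := by unfold Spec_split_section_hunks_py; infer_instance

-- ===== CLAIM (what is proved, stated in full; the proofs are below) =====
def Claim_equal_split_section_hunks_py : Prop := ∀ (section_lines : List String), Dom_split_section_hunks_py section_lines → Spec_split_section_hunks_py section_lines (split_section_hunks_py section_lines)

-- ===== LEMMAS AND PROOFS =====

-- reference splitter: segments of `ls` cut before each header line, the parameter `p`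
-- (the frozen prefix) prepended to each newly started segment, `c` the open segment
def pvSegs (p c : List String) : List String → List (List String)
  | [] => [c]
  | l :: rest => if pvHdr l then c :: pvSegs p (p ++ [l]) rest else pvSegs p (c ++ [l]) rest

theorem pvSegs_ne_nil (p c : List String) (ls : List String) : pvSegs p c ls ≠ [] := by
  induction ls generalizing c with
  | nil => simp [pvSegs]
  | cons l rest ih =>
    by_cases h : pvHdr l <;> simp [pvSegs, h] <;> exact ih _

theorem pvSegs_nohdr (p c : List String) (m : List String)
    (hm : ∀ x ∈ m, pvHdr x = false) : pvSegs p c m = [c ++ m] := by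
  induction m generalizing c with
  | nil => simp [pvSegs]
  | cons l rest ih =>
    have hl : pvHdr l = false := hm l (by simp)
    have : pvSegs p (c ++ [l]) rest = [(c ++ [l]) ++ rest] :=
      ih _ (fun x hx => hm x (by simp [hx]))
    simp [pvSegs, hl, this]

theorem pvSegs_app (p c : List String) (m t : List String)
    (hm : ∀ x ∈ m, pvHdr x = false) : pvSegs p c (m ++ t) = pvSegs p (c ++ m) t := by
  induction m generalizing c with
  | nil => simp
  | cons l rest ih =>
    have hl : pvHdr l = false := hm l (by simp)
    have := ih (c := c ++ [l]) (fun x hx => hm x (by simp [hx]))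
    simpa [pvSegs, hl, List.append_assoc] using this

theorem pvSegs_map (x p c : List String) (ls : List String) :
    pvSegs (x ++ p) (x ++ c) ls = (pvSegs p c ls).map (fun hk => x ++ hk) := by
  induction ls generalizing c with
  | nil => simp [pvSegs]
  | cons l rest ih =>
    by_cases h : pvHdr l
    · simp only [pvSegs, h, if_true, List.map_cons]
      rw [List.append_assoc] at *
      exact congrArg _ (ih _)
    · simpa [pvSegs, h, List.append_assoc] using ih (c := c ++ [l])

-- B's loop once a hunk is open
theorem pvAltGo_some (ls : List String) : ∀ (p : List String) (hunks : List (List String)) (c : List String),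
    pvAltGo ls p hunks (some c) = hunks ++ pvSegs p c ls := by
  induction ls with
  | nil => intro p hunks c; simp [pvAltGo, pvSegs]
  | cons l rest ih =>
    intro p hunks c
    by_cases h : pvHdr l
    · simp [pvAltGo, h, pvSegs, ih]
    · simp [pvAltGo, h, pvSegs, ih]

-- B's loop while no hunk is open
theorem pvAltGo_none (ls : List String) : ∀ (p : List String),
    pvAltGo ls p [] none =
      (match ls.dropWhile (fun x => !pvHdr x) with
       | [] => []
       | h :: t =>
         pvSegs (p ++ ls.takeWhile (fun x => !pvHdr x))
                ((p ++ ls.takeWhile (fun x => !pvHdr x)) ++ [h]) t) := by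
  induction ls with
  | nil => intro p; simp [pvAltGo]
  | cons l rest ih =>
    intro p
    by_cases h : pvHdr l
    · simp [pvAltGo, h, pvAltGo_some, List.dropWhile, List.takeWhile]
    · simp only [pvAltGo, h, if_false, Bool.false_eq_true]
      rw [ih (p ++ [l])]
      simp [List.dropWhile, List.takeWhile, h, List.append_assoc]

-- ---- A-side lemmas ----

theorem pvHdrStarts_cons (s : Int) (l : String) (ls : List String) :
    pvHdrStarts s (l :: ls) = (if pvHdr l then [s] else []) ++ pvHdrStarts (s + 1) ls := by
  by_cases h : pvHdr l <;> simp [pvHdrStarts, PySem.List.enumerate_cons, h]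

theorem pvHdrStarts_shift (ls : List String) : ∀ (s t : Int),
    pvHdrStarts (s + t) ls = (pvHdrStarts s ls).map (· + t) := by
  induction ls with
  | nil => intro s t; simp [pvHdrStarts]
  | cons l rest ih =>
    intro s t
    rw [pvHdrStarts_cons, pvHdrStarts_cons]
    have : s + t + 1 = (s + 1) + t := by ring
    rw [this, ih (s + 1) t]
    by_cases h : pvHdr l <;> simp [h]

theorem pvHdrStarts_nohdr (m : List String) (hm : ∀ x ∈ m, pvHdr x = false) :
    ∀ s, pvHdrStarts s m = [] := by
  induction m with
  | nil => intro s; simp [pvHdrStarts]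
  | cons l rest ih =>
    intro s
    rw [pvHdrStarts_cons]
    simp [hm l (by simp), ih (fun x hx => hm x (by simp [hx]))]

theorem pvHdrStarts_append_nohdr (m : List String) (u : List String)
    (hm : ∀ x ∈ m, pvHdr x = false) : ∀ s, pvHdrStarts s (m ++ u) = pvHdrStarts (s + m.length) u := by
  induction m with
  | nil => intro s; simp
  | cons l rest ih =>
    intro s
    have hl : pvHdr l = false := hm l (by simp)
    rw [List.cons_append, pvHdrStarts_cons, ih (fun x hx => hm x (by simp [hx]))]
    simp [hl]
    congr 1
    push_cast
    ring

theorem pvHdrStarts_mem (ls : List String) (x : Int) (hx : x ∈ pvHdrStarts 0 ls) :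
    0 ≤ x ∧ x < (ls.length : Int) := by
  simp only [pvHdrStarts, List.mem_map, List.mem_filter] at hx
  obtain ⟨p, ⟨hp, _⟩, rfl⟩ := hx
  rw [PySem.List.mem_enumerate_iff] at hp
  obtain ⟨k, hk, rfl⟩ := hp
  simp
  omega

-- slice helpers specific to this file's index arithmetic
theorem pvSlice_succ_succ {α : Type} (x : α) (xs : List α) (s e : Int) (hs : 0 ≤ s) (he : 0 ≤ e) :
    PySem.List.slice (x :: xs) (some (s + 1)) (some (e + 1)) = PySem.List.slice xs (some s) (some e) := by
  rw [PySem.List.slice_toNat _ (by omega) (by omega), PySem.List.slice_toNat _ hs he]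
  have h1 : (s + 1).toNat = s.toNat + 1 := by omega
  have h2 : (e + 1).toNat = e.toNat + 1 := by omega
  simp [h1, h2]

theorem pvSlice_shift_append {α : Type} (xs ys : List α) (s e : Int) (hs : 0 ≤ s) (he : 0 ≤ e) :
    PySem.List.slice (xs ++ ys) (some ((xs.length : Int) + s)) (some ((xs.length : Int) + e)) =
      PySem.List.slice ys (some s) (some e) := by
  rw [PySem.List.slice_toNat _ (by omega) (by omega), PySem.List.slice_toNat _ hs he]
  have h1 : ((xs.length : Int) + s).toNat = xs.length + s.toNat := by omega
  have h2 : ((xs.length : Int) + e).toNat = xs.length + e.toNat := by omega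
  have h3 : List.drop (xs.length + s.toNat) xs = [] := by simp
  have h4 : xs.length + s.toNat - xs.length = s.toNat := by omega
  have h5 : xs.length + e.toNat - (xs.length + s.toNat) = e.toNat - s.toNat := by omega
  rw [h1, h2, List.drop_append, h3, h4, h5, List.nil_append]

theorem pvSlice_full {α : Type} (xs : List α) :
    PySem.List.slice xs (some 0) (some (xs.length : Int)) = xs := by
  rw [PySem.List.slice_toNat _ (by omega) (by omega)]
  simp

theorem pvSlice_none_succ {α : Type} (x : α) (xs : List α) (s : Int) (hs : 0 ≤ s) :
    PySem.List.slice (x :: xs) none (some (s + 1)) = x :: PySem.List.slice xs none (some s) := by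
  rw [PySem.List.slice_to _ (by omega : (0:Int) ≤ s + 1), PySem.List.slice_to _ hs]
  have h1 : (s + 1).toNat = s.toNat + 1 := by omega
  rw [h1, List.take_succ_cons]

-- A, written as a map over the enumerated header starts (when there is a header)
theorem pvA_eq_map (sl : List String) (h : pvHdrStarts 0 sl ≠ []) :
    split_section_hunks_py sl =
      (PySem.List.enumerate (pvHdrStarts 0 sl) 0).map (fun p =>
        PySem.List.slice sl none (some (PySem.List.pyGetD (pvHdrStarts 0 sl) 0 0)) ++
        PySem.List.slice sl (some p.2)
          (some (if p.1 + 1 < ((pvHdrStarts 0 sl).length : Int)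
                 then PySem.List.pyGetD (pvHdrStarts 0 sl) (p.1 + 1) 0
                 else (sl.length : Int)))) := by
  rw [split_section_hunks_py]
  simp only [List.isEmpty_iff, h, if_false]
  rw [PySem.List.foldl_append_singleton_eq_map]
  simp

theorem pvA_nohdr (sl : List String) (h : pvHdrStarts 0 sl = []) :
    split_section_hunks_py sl = [sl] := by
  rw [split_section_hunks_py]
  simp [h]

-- prepending a non-header line conses it onto every hunk
theorem pvA_cons_nonhdr (l : String) (rest : List String) (hl : pvHdr l = false) :
    split_section_hunks_py (l :: rest) = (split_section_hunks_py rest).map (fun hk => l :: hk) := by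
  have hshift : pvHdrStarts 0 (l :: rest) = (pvHdrStarts 0 rest).map (· + 1) := by
    rw [pvHdrStarts_cons]
    have h1 := pvHdrStarts_shift rest 0 1
    simp only [zero_add] at h1
    simp [hl, h1]
  rcases hcase : pvHdrStarts 0 rest with _ | ⟨s0, hs0'⟩
  · have hz : pvHdrStarts 0 (l :: rest) = [] := by rw [hshift, hcase]; rfl
    rw [pvA_nohdr _ hz, pvA_nohdr _ hcase]
    simp
  · have hne : pvHdrStarts 0 rest ≠ [] := by rw [hcase]; simp
    have hne' : pvHdrStarts 0 (l :: rest) ≠ [] := by rw [hshift, hcase]; simp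
    rw [pvA_eq_map _ hne', pvA_eq_map _ hne, hshift, hcase]
    apply List.ext_getElem
    · simp [PySem.List.length_enumerate]
    · intro k hk1 hk2
      have hk : k < (s0 :: hs0').length := by
        simpa [PySem.List.length_enumerate] using hk2
      simp only [List.getElem_map, PySem.List.getElem_enumerate, List.length_map,
        PySem.List.length_enumerate]
      have hb0 : 0 ≤ s0 ∧ s0 < (rest.length : Int) :=
        pvHdrStarts_mem rest s0 (by rw [hcase]; exact List.mem_cons_self)
      have hbk : 0 ≤ (s0 :: hs0')[k] ∧ (s0 :: hs0')[k] < (rest.length : Int) :=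
        pvHdrStarts_mem rest _ (by rw [hcase]; exact List.getElem_mem hk)
      have hidx : (0 : Int) + ↑k + 1 = ((k + 1 : Nat) : Int) := by push_cast; ring
      rw [hidx]
      by_cases hc : ((k + 1 : Nat) : Int) < ((s0 :: hs0').length : Int)
      · rw [if_pos (by simpa using hc), if_pos hc]
        have hk1' : k + 1 < (s0 :: hs0').length := by exact_mod_cast hc
        rw [PySem.List.pyGetD_natCast, PySem.List.pyGetD_natCast,
          List.getD_eq_getElem _ _ (by simpa using hk1'), List.getD_eq_getElem _ _ hk1',
          List.getElem_map]
        have hbk1 : 0 ≤ (s0 :: hs0')[k + 1] ∧ (s0 :: hs0')[k + 1] < (rest.length : Int) :=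
          pvHdrStarts_mem rest _ (by rw [hcase]; exact List.getElem_mem hk1')
        simp only [List.map_cons, PySem.List.pyGetD_zero, List.getD_cons_zero, List.getElem_map]
        rw [pvSlice_none_succ _ _ _ hb0.1, pvSlice_succ_succ _ _ _ _ hbk.1 hbk1.1]
        simp
      · rw [if_neg (by simpa using hc), if_neg hc]
        simp only [List.map_cons, PySem.List.pyGetD_zero, List.getD_cons_zero, List.getElem_map,
          List.length_cons]
        have hlen : ((rest.length + 1 : Nat) : Int) = (rest.length : Int) + 1 := by push_cast; ring
        rw [hlen, pvSlice_none_succ _ _ _ hb0.1, pvSlice_succ_succ _ _ _ _ hbk.1 (by positivity)]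
        simp

-- prepending a header line, a header-free block and a header-led tail
theorem pvA_step (l h : String) (m t : List String) (hl : pvHdr l = true)
    (hm : ∀ x ∈ m, pvHdr x = false) (hh : pvHdr h = true) :
    split_section_hunks_py (l :: (m ++ h :: t)) = (l :: m) :: split_section_hunks_py (h :: t) := by
  obtain ⟨g', hg'⟩ : ∃ g', pvHdrStarts 0 (h :: t) = 0 :: g' := by
    rw [pvHdrStarts_cons]
    exact ⟨pvHdrStarts (0 + 1) t, by simp [hh]⟩
  have hsl : pvHdrStarts 0 (l :: (m ++ h :: t)) =
      0 :: (pvHdrStarts 0 (h :: t)).map (· + (1 + (m.length : Int))) := by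
    rw [pvHdrStarts_cons]
    simp only [zero_add]
    rw [pvHdrStarts_append_nohdr m _ hm 1]
    have hsh := pvHdrStarts_shift (h :: t) 0 (1 + (m.length : Int))
    simp only [zero_add] at hsh
    simp [hl, hsh]
  have hgne : pvHdrStarts 0 (h :: t) ≠ [] := by rw [hg']; simp
  have hslne : pvHdrStarts 0 (l :: (m ++ h :: t)) ≠ [] := by rw [hsl]; simp
  rw [pvA_eq_map _ hslne, pvA_eq_map _ hgne, hsl, hg']
  have happ : l :: (m ++ h :: t) = (l :: m) ++ (h :: t) := by simp
  have hkk : 1 + (m.length : Int) = (((l :: m).length : Nat) : Int) := by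
    push_cast [List.length_cons]; ring
  apply List.ext_getElem
  · simp [PySem.List.length_enumerate]
  · intro k hk1 hk2
    have hk : k < g'.length + 2 := by
      have := hk1
      simp only [List.length_map, PySem.List.length_enumerate, List.length_cons] at this
      omega
    simp only [List.getElem_map, PySem.List.getElem_enumerate, List.length_map,
      List.length_cons, PySem.List.pyGetD_zero, List.getD_cons_zero]
    rcases k with _ | j
    · -- first hunk: the shared prefix  l :: m
      simp only [List.getElem_cons_zero, Nat.cast_zero]
      have hi1 : (0 : Int) + 0 + 1 = ((1 : Nat) : Int) := by norm_num
      rw [hi1, if_pos (show ((1 : Nat) : Int) < ((g'.length + 1 + 1 : Nat) : Int) from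
        Nat.cast_lt.mpr (by omega))]
      rw [PySem.List.pyGetD_natCast]
      simp only [List.map_cons, List.getD_cons_succ, List.getD_cons_zero, zero_add]
      rw [hkk, happ]
      have hsz : PySem.List.slice ((l :: m) ++ (h :: t)) none (some 0) = [] := by
        rw [PySem.List.slice_to _ le_rfl]; simp
      rw [hsz, PySem.List.slice_toNat _ (by positivity) (by positivity)]
      simp
    · -- later hunks: the hunks of  h :: t, shifted by the prefix length
      simp only [List.getElem_cons_succ, List.getElem_map, PySem.List.getElem_enumerate]
      have hj : j < g'.length + 1 := by omega
      have hbj : 0 ≤ (0 :: g')[j]'(by simpa using hj) ∧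
          (0 :: g')[j]'(by simpa using hj) < (((h :: t).length : Nat) : Int) :=
        pvHdrStarts_mem _ _ (by rw [hg']; exact List.getElem_mem (by simpa using hj))
      have hszL : PySem.List.slice (l :: (m ++ h :: t)) none (some 0) = [] := by
        rw [PySem.List.slice_to _ le_rfl]; simp
      have hszR : PySem.List.slice (h :: t) none (some 0) = [] := by
        rw [PySem.List.slice_to _ le_rfl]; simp
      have hcast : (0 : Int) + ((j + 1 : Nat) : Int) + 1 = ((j + 2 : Nat) : Int) := by
        push_cast; ring
      have hcast2 : (0 : Int) + ((j : Nat) : Int) + 1 = ((j + 1 : Nat) : Int) := by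
        push_cast; ring
      have e1 : (0 :: g')[j]'(by simpa using hj) + (1 + (m.length : Int)) =
          (((l :: m).length : Nat) : Int) + (0 :: g')[j]'(by simpa using hj) := by
        rw [← hkk]; ring
      simp only [hszL, hszR, hcast, hcast2, PySem.List.pyGetD_natCast]
      split_ifs with h1 h2 h2
      · -- both ends are interior header starts
        have hj1 : j + 1 < (0 :: g').length := by
          push_cast at h2; simpa using h2
        have hbj1 : 0 ≤ (0 :: g')[j + 1]'hj1 ∧
            (0 :: g')[j + 1]'hj1 < (((h :: t).length : Nat) : Int) :=
          pvHdrStarts_mem _ _ (by rw [hg']; exact List.getElem_mem hj1)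
        have e2 : (0 :: g')[j + 1]'hj1 + (1 + (m.length : Int)) =
            (((l :: m).length : Nat) : Int) + (0 :: g')[j + 1]'hj1 := by
          rw [← hkk]; ring
        simp only [show j + 2 = (j + 1) + 1 by omega, List.getD_cons_succ,
          List.getD_eq_getElem _ _ (show j + 1 < ((0 :: g').map (· + (1 + (m.length : Int)))).length by simpa using hj1),
          List.getD_eq_getElem _ _ hj1, List.getElem_map, happ, e1, e2]
        rw [pvSlice_shift_append _ _ _ _ hbj.1 hbj1.1]
      · exfalso; push_cast at h1 h2; omega
      · exfalso; push_cast at h1 h2; omega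
      · -- both hunks run to the end of the section
        have e3 : (((m ++ h :: t).length + 1 : Nat) : Int) =
            (((l :: m).length : Nat) : Int) + ((t.length + 1 : Nat) : Int) := by
          push_cast [List.length_append, List.length_cons]; ring
        simp only [happ, e1, e3]
        rw [pvSlice_shift_append _ _ _ _ hbj.1 (by positivity)]

theorem pvDropWhileHead {α : Type} (p : α → Bool) : ∀ (ls : List α) (h : α) (t : List α),
    ls.dropWhile p = h :: t → p h = false := by
  intro ls
  induction ls with
  | nil => intro h t hx; simp [List.dropWhile] at hx
  | cons a as ih =>
    intro h t hx
    by_cases hp : p a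
    · rw [List.dropWhile_cons_of_pos hp] at hx; exact ih _ _ hx
    · rw [List.dropWhile_cons_of_neg hp] at hx
      cases hx; simpa using hp

theorem pvA_hdr_base (l : String) (rest : List String) (hl : pvHdr l = true)
    (hm : ∀ x ∈ rest, pvHdr x = false) : split_section_hunks_py (l :: rest) = [l :: rest] := by
  have hs : pvHdrStarts 0 (l :: rest) = [0] := by
    rw [pvHdrStarts_cons]
    simp [hl, pvHdrStarts_nohdr rest hm]
  rw [pvA_eq_map _ (by rw [hs]; simp), hs]
  simp only [PySem.List.enumerate_cons, PySem.List.enumerate_nil, List.map_cons, List.map_nil,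
    PySem.List.pyGetD_zero, List.getD_cons_zero, List.length_cons, List.length_nil]
  rw [if_neg (by norm_num)]
  have hsz : PySem.List.slice (l :: rest) none (some 0) = [] := by
    rw [PySem.List.slice_to _ le_rfl]; simp
  rw [hsz, show ((rest.length + 1 : Nat) : Int) = (((l :: rest).length : Nat) : Int) by simp,
    pvSlice_full]
  simp

theorem pvA_hdr (n : Nat) : ∀ (rest : List String), rest.length ≤ n → ∀ (l : String), pvHdr l = true →
    split_section_hunks_py (l :: rest) = pvSegs [] [l] rest := by
  induction n with
  | zero =>
    intro rest hlen l hl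
    have hre : rest = [] := List.eq_nil_of_length_eq_zero (by omega)
    subst hre
    rw [pvA_hdr_base l [] hl (by simp)]
    simp [pvSegs]
  | succ n ih =>
    intro rest hlen l hl
    have hsplit : rest = rest.takeWhile (fun x => !pvHdr x) ++ rest.dropWhile (fun x => !pvHdr x) :=
      (List.takeWhile_append_dropWhile).symm
    have hm : ∀ x ∈ rest.takeWhile (fun x => !pvHdr x), pvHdr x = false := by
      intro x hx
      simpa using List.mem_takeWhile_imp hx
    cases hdw : rest.dropWhile (fun x => !pvHdr x) with
    | nil =>
      have hall : ∀ x ∈ rest, pvHdr x = false := by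
        intro x hx
        apply hm
        rw [hsplit, hdw] at hx
        simpa using hx
      rw [pvA_hdr_base l rest hl hall, pvSegs_nohdr _ _ rest hall]
      simp
    | cons hh tt =>
      have hhh : pvHdr hh = true := by
        have := pvDropWhileHead _ rest hh tt hdw
        simpa using this
      have hre : rest = rest.takeWhile (fun x => !pvHdr x) ++ hh :: tt := by
        conv_lhs => rw [hsplit]
        rw [hdw]
      have htt : tt.length ≤ n := by
        have := congrArg List.length hre
        simp [List.length_append] at this
        omega
      conv_lhs => rw [hre]
      rw [pvA_step l hh _ tt hl hm hhh, ih tt htt hh hhh]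
      conv_rhs => rw [hre]
      rw [pvSegs_app _ _ _ _ hm]
      simp [pvSegs, hhh]

theorem pvA_prefix_map (m : List String) (u : List String) (hm : ∀ x ∈ m, pvHdr x = false) :
    split_section_hunks_py (m ++ u) = (split_section_hunks_py u).map (fun hk => m ++ hk) := by
  induction m with
  | nil => simp
  | cons x m' ih =>
    have hx : pvHdr x = false := hm x (by simp)
    rw [List.cons_append, pvA_cons_nonhdr x _ hx, ih (fun y hy => hm y (by simp [hy]))]
    simp [List.map_map, Function.comp_def]

theorem pv_main (sl : List String) : split_section_hunks_py sl = split_section_hunks_py_alt sl := by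
  have hm : ∀ x ∈ sl.takeWhile (fun x => !pvHdr x), pvHdr x = false := by
    intro x hx
    simpa using List.mem_takeWhile_imp hx
  have hsplit : sl = sl.takeWhile (fun x => !pvHdr x) ++ sl.dropWhile (fun x => !pvHdr x) :=
    (List.takeWhile_append_dropWhile).symm
  cases hdw : sl.dropWhile (fun x => !pvHdr x) with
  | nil =>
    have hall : ∀ x ∈ sl, pvHdr x = false := by
      intro x hx
      apply hm
      rw [hsplit, hdw] at hx
      simpa using hx
    rw [pvA_nohdr _ (pvHdrStarts_nohdr sl hall 0)]
    unfold split_section_hunks_py_alt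
    rw [pvAltGo_none sl [], hdw]
    simp
  | cons h t =>
    have hh : pvHdr h = true := by
      have := pvDropWhileHead _ sl h t hdw
      simpa using this
    have hsl : sl = sl.takeWhile (fun x => !pvHdr x) ++ h :: t := by
      conv_lhs => rw [hsplit]
      rw [hdw]
    have hA : split_section_hunks_py sl =
        pvSegs (sl.takeWhile (fun x => !pvHdr x)) (sl.takeWhile (fun x => !pvHdr x) ++ [h]) t := by
      conv_lhs => rw [hsl]
      rw [pvA_prefix_map _ _ hm, pvA_hdr t.length t le_rfl h hh]
      have := pvSegs_map (sl.takeWhile (fun x => !pvHdr x)) [] [h] t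
      simp only [List.append_nil] at this
      rw [← this]
    rw [hA]
    unfold split_section_hunks_py_alt
    rw [pvAltGo_none sl [], hdw]
    simp only [List.nil_append]
    rw [if_neg (by simp [List.isEmpty_iff, pvSegs_ne_nil])]

-- ===== VERDICT (by name: the statement is the Claim_ definition above) =====
theorem split_section_hunks_py_spec : Claim_equal_split_section_hunks_py := by
  intro sl _
  unfold Spec_split_section_hunks_py
  exact pv_main sl
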